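-- pv_equiv track=rewrite | github.com/fctr-id/okta-ai-agent | src/data/real_world_hybrid_executor.py | _semantic_operation_match
-- ===== SOURCE A (Python) =====
-- def _semantic_operation_match(endpoint_op: str, requested_op: str) -> bool:
--     """Semantic matching for operations with common aliases"""
--     # Direct match
--     if endpoint_op == requested_op:
--         return True
--
--     # Common aliases
--     aliases = {
--         'list': ['list', 'get', 'retrieve', 'fetch'],
--         'list_members': ['list_members', 'members', 'list'],
--         'list_user_assignments': ['list_user_assignments', 'assignments', 'list'],
--         'list_factors': ['list_factors', 'factors', 'list_enrollments', 'list'],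
--         'get': ['get', 'retrieve', 'fetch'],
--         'create': ['create', 'add', 'post'],
--     }
--
--     for alias_group in aliases.values():
--         if endpoint_op in alias_group and requested_op in alias_group:
--             return True
--
--     return False
-- ===== SOURCE B (Python) =====
-- # Bitmask re-implementation: each operation name carries an integer bitmask of the
-- # alias groups it belongs to (bit i = membership in group i of the original alias
-- # table); two operations match iff they are equal or their masks share a bit.
--
-- # bit 0 = 'list' group, bit 1 = 'list_members', bit 2 = 'list_user_assignments',
-- # bit 3 = 'list_factors', bit 4 = 'get', bit 5 = 'create'
-- _GROUP_MASK = {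
--     'list': 0b001111,
--     'get': 0b010001,
--     'retrieve': 0b010001,
--     'fetch': 0b010001,
--     'list_members': 0b000010,
--     'members': 0b000010,
--     'list_user_assignments': 0b000100,
--     'assignments': 0b000100,
--     'list_factors': 0b001000,
--     'factors': 0b001000,
--     'list_enrollments': 0b001000,
--     'create': 0b100000,
--     'add': 0b100000,
--     'post': 0b100000,
-- }
--
--
-- def _semantic_operation_match(endpoint_op: str, requested_op: str) -> bool:
--     """Semantic matching for operations with common aliases"""
--     if endpoint_op == requested_op:
--         return True
--     return _GROUP_MASK.get(endpoint_op, 0) & _GROUP_MASK.get(requested_op, 0) != 0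
-- ===== Notes on version B (the rewrite author's own statement) =====
-- stated objective: alternative
-- what changed: Replaces the per-call scan over every alias group (testing membership of both names in each list) with a precomputed per-name group bitmask table; matching becomes two dict lookups and a bitwise-AND nonzero test, keeping the direct-equality early return.
import Mathlib
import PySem

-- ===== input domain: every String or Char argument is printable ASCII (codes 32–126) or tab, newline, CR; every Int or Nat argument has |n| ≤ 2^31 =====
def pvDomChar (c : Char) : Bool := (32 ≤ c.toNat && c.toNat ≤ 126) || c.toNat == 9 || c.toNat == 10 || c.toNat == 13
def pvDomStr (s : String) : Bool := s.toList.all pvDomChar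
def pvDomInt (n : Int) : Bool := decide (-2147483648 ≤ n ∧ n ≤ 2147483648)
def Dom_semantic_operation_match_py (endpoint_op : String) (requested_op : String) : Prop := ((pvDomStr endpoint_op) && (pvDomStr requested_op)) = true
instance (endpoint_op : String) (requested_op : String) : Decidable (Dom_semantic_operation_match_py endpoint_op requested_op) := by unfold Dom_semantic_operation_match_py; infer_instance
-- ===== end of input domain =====

-- B replaces A's scan over every alias group by a precomputed per-name bitmask of group
-- memberships: match = equality or nonzero AND of the two masks (objective: alternative).

-- ===== PORT A =====
def pvAliases : PySem.Dict String (List String) := PySem.Dict.ofList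
  [ ("list", ["list", "get", "retrieve", "fetch"]),
    ("list_members", ["list_members", "members", "list"]),
    ("list_user_assignments", ["list_user_assignments", "assignments", "list"]),
    ("list_factors", ["list_factors", "factors", "list_enrollments", "list"]),
    ("get", ["get", "retrieve", "fetch"]),
    ("create", ["create", "add", "post"]) ]

def semantic_operation_match_py (endpoint_op : String) (requested_op : String) : Bool :=
  if endpoint_op == requested_op then true
  else
    -- 'for alias_group in aliases.values(): if … return True' as a fold carrying the found flag
    pvAliases.values.foldl
      (fun found alias_group =>
        found || (alias_group.contains endpoint_op && alias_group.contains requested_op))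
      false

-- ===== PORT B =====
-- _GROUP_MASK: bit i = membership in alias group i (list, list_members,
-- list_user_assignments, list_factors, get, create)
def pvGroupMask : PySem.Dict String Int := PySem.Dict.ofList
  [ ("list", 15),
    ("get", 17),
    ("retrieve", 17),
    ("fetch", 17),
    ("list_members", 2),
    ("members", 2),
    ("list_user_assignments", 4),
    ("assignments", 4),
    ("list_factors", 8),
    ("factors", 8),
    ("list_enrollments", 8),
    ("create", 32),
    ("add", 32),
    ("post", 32) ]

def semantic_operation_match_py_alt (endpoint_op : String) (requested_op : String) : Bool :=
  if endpoint_op == requested_op then true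
  else PySem.Int.band (pvGroupMask.getD endpoint_op 0) (pvGroupMask.getD requested_op 0) != 0  -- Python's '&' on ints = PySem.Int.band (exact)

-- ===== PRECONDITION & SPEC =====
def Spec_semantic_operation_match_py (endpoint_op : String) (requested_op : String) (out : Bool) : Prop := out = semantic_operation_match_py_alt endpoint_op requested_op
instance (endpoint_op : String) (requested_op : String) (out : Bool) : Decidable (Spec_semantic_operation_match_py endpoint_op requested_op out) := by unfold Spec_semantic_operation_match_py; infer_instance

-- ===== CLAIM (what is proved, stated in full; the proofs are below) =====
def Claim_equal_semantic_operation_match_py : Prop := ∀ (endpoint_op : String) (requested_op : String), Dom_semantic_operation_match_py endpoint_op requested_op → Spec_semantic_operation_match_py endpoint_op requested_op (semantic_operation_match_py endpoint_op requested_op)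

-- ===== LEMMAS AND PROOFS =====

-- the alias groups of A, read off the literal table
lemma pvAliases_values : pvAliases.values =
    [ ["list", "get", "retrieve", "fetch"],
      ["list_members", "members", "list"],
      ["list_user_assignments", "assignments", "list"],
      ["list_factors", "factors", "list_enrollments", "list"],
      ["get", "retrieve", "fetch"],
      ["create", "add", "post"] ] := by decide


-- the mask table, in Dict.mk form for get? lemmas
lemma pvGroupMask_eq : pvGroupMask = PySem.Dict.mk
    [ ("list", 15), ("get", 17), ("retrieve", 17), ("fetch", 17), ("list_members", 2),
      ("members", 2), ("list_user_assignments", 4), ("assignments", 4), ("list_factors", 8),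
      ("factors", 8), ("list_enrollments", 8), ("create", 32), ("add", 32), ("post", 32) ] := by decide

-- every string is one of the 14 operation names occurring in the alias table, or none of them
lemma pv_classify (s : String) :
    s = "list" ∨ s = "get" ∨ s = "retrieve" ∨ s = "fetch" ∨ s = "list_members" ∨
    s = "members" ∨ s = "list_user_assignments" ∨ s = "assignments" ∨ s = "list_factors" ∨
    s = "factors" ∨ s = "list_enrollments" ∨ s = "create" ∨ s = "add" ∨ s = "post" ∨
    (s ≠ "list" ∧ s ≠ "get" ∧ s ≠ "retrieve" ∧ s ≠ "fetch" ∧ s ≠ "list_members" ∧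
     s ≠ "members" ∧ s ≠ "list_user_assignments" ∧ s ≠ "assignments" ∧ s ≠ "list_factors" ∧
     s ≠ "factors" ∧ s ≠ "list_enrollments" ∧ s ≠ "create" ∧ s ≠ "add" ∧ s ≠ "post") := by
  by_cases h1 : s = "list"; · exact Or.inl h1
  by_cases h2 : s = "get"; · tauto
  by_cases h3 : s = "retrieve"; · tauto
  by_cases h4 : s = "fetch"; · tauto
  by_cases h5 : s = "list_members"; · tauto
  by_cases h6 : s = "members"; · tauto
  by_cases h7 : s = "list_user_assignments"; · tauto
  by_cases h8 : s = "assignments"; · tauto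
  by_cases h9 : s = "list_factors"; · tauto
  by_cases h10 : s = "factors"; · tauto
  by_cases h11 : s = "list_enrollments"; · tauto
  by_cases h12 : s = "create"; · tauto
  by_cases h13 : s = "add"; · tauto
  by_cases h14 : s = "post"; · tauto
  exact Or.inr (Or.inr (Or.inr (Or.inr (Or.inr (Or.inr (Or.inr (Or.inr (Or.inr (Or.inr
    (Or.inr (Or.inr (Or.inr (Or.inr ⟨h1,h2,h3,h4,h5,h6,h7,h8,h9,h10,h11,h12,h13,h14⟩)))))))))))))

-- when the REQUESTED op is none of the table's names, both programs reduce to the direct-equality test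
lemma pv_unknownR_A (e r : String)
    (hr : r ≠ "list" ∧ r ≠ "get" ∧ r ≠ "retrieve" ∧ r ≠ "fetch" ∧ r ≠ "list_members" ∧
     r ≠ "members" ∧ r ≠ "list_user_assignments" ∧ r ≠ "assignments" ∧ r ≠ "list_factors" ∧
     r ≠ "factors" ∧ r ≠ "list_enrollments" ∧ r ≠ "create" ∧ r ≠ "add" ∧ r ≠ "post") :
    semantic_operation_match_py e r = (e == r) := by
  obtain ⟨h1,h2,h3,h4,h5,h6,h7,h8,h9,h10,h11,h12,h13,h14⟩ := hr
  by_cases h : e = r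
  · simp [semantic_operation_match_py, h]
  · simp [semantic_operation_match_py, pvAliases_values, List.foldl, h,
      h1, h2, h3, h4, h5, h6, h7, h8, h9, h10, h11, h12, h13, h14]

lemma pv_unknownR_B (e r : String)
    (hr : r ≠ "list" ∧ r ≠ "get" ∧ r ≠ "retrieve" ∧ r ≠ "fetch" ∧ r ≠ "list_members" ∧
     r ≠ "members" ∧ r ≠ "list_user_assignments" ∧ r ≠ "assignments" ∧ r ≠ "list_factors" ∧
     r ≠ "factors" ∧ r ≠ "list_enrollments" ∧ r ≠ "create" ∧ r ≠ "add" ∧ r ≠ "post") :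
    semantic_operation_match_py_alt e r = (e == r) := by
  obtain ⟨h1,h2,h3,h4,h5,h6,h7,h8,h9,h10,h11,h12,h13,h14⟩ := hr
  by_cases h : e = r
  · simp [semantic_operation_match_py_alt, h]
  · have hidx : pvGroupMask.getD r 0 = (0 : Int) := by
      simp [pvGroupMask_eq, PySem.Dict.getD, PySem.Dict.get?_mk_cons, PySem.Dict.get?, beq_iff_eq,
        Ne.symm h1, Ne.symm h2, Ne.symm h3, Ne.symm h4, Ne.symm h5, Ne.symm h6, Ne.symm h7,
        Ne.symm h8, Ne.symm h9, Ne.symm h10, Ne.symm h11, Ne.symm h12, Ne.symm h13, Ne.symm h14]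
    have hbe : (e == r) = false := by simp [h]
    simp [semantic_operation_match_py_alt, hbe, hidx]

-- when the ENDPOINT op is none of the table's names, likewise
lemma pv_unknownE_A (e r : String)
    (he : e ≠ "list" ∧ e ≠ "get" ∧ e ≠ "retrieve" ∧ e ≠ "fetch" ∧ e ≠ "list_members" ∧
     e ≠ "members" ∧ e ≠ "list_user_assignments" ∧ e ≠ "assignments" ∧ e ≠ "list_factors" ∧
     e ≠ "factors" ∧ e ≠ "list_enrollments" ∧ e ≠ "create" ∧ e ≠ "add" ∧ e ≠ "post") :
    semantic_operation_match_py e r = (e == r) := by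
  obtain ⟨h1,h2,h3,h4,h5,h6,h7,h8,h9,h10,h11,h12,h13,h14⟩ := he
  by_cases h : e = r
  · simp [semantic_operation_match_py, h]
  · simp [semantic_operation_match_py, pvAliases_values, List.foldl, h,
      h1, h2, h3, h4, h5, h6, h7, h8, h9, h10, h11, h12, h13, h14]

lemma pv_unknownE_B (e r : String)
    (he : e ≠ "list" ∧ e ≠ "get" ∧ e ≠ "retrieve" ∧ e ≠ "fetch" ∧ e ≠ "list_members" ∧
     e ≠ "members" ∧ e ≠ "list_user_assignments" ∧ e ≠ "assignments" ∧ e ≠ "list_factors" ∧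
     e ≠ "factors" ∧ e ≠ "list_enrollments" ∧ e ≠ "create" ∧ e ≠ "add" ∧ e ≠ "post") :
    semantic_operation_match_py_alt e r = (e == r) := by
  obtain ⟨h1,h2,h3,h4,h5,h6,h7,h8,h9,h10,h11,h12,h13,h14⟩ := he
  by_cases h : e = r
  · simp [semantic_operation_match_py_alt, h]
  · have hidx : pvGroupMask.getD e 0 = (0 : Int) := by
      simp [pvGroupMask_eq, PySem.Dict.getD, PySem.Dict.get?_mk_cons, PySem.Dict.get?, beq_iff_eq,
        Ne.symm h1, Ne.symm h2, Ne.symm h3, Ne.symm h4, Ne.symm h5, Ne.symm h6, Ne.symm h7,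
        Ne.symm h8, Ne.symm h9, Ne.symm h10, Ne.symm h11, Ne.symm h12, Ne.symm h13, Ne.symm h14]
    have hbe : (e == r) = false := by simp [h]
    simp [semantic_operation_match_py_alt, hbe, hidx]
    rw [PySem.Int.band_comm]
    exact PySem.Int.band_zero _

-- ===== VERDICT (by name: the statement is the Claim_ definition above) =====
theorem semantic_operation_match_py_spec : Claim_equal_semantic_operation_match_py := by
  intro e r _
  unfold Spec_semantic_operation_match_py
  rcases pv_classify e with rfl|rfl|rfl|rfl|rfl|rfl|rfl|rfl|rfl|rfl|rfl|rfl|rfl|rfl|he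
  all_goals first
    | (rw [pv_unknownE_A e r he, pv_unknownE_B e r he])
    | (rcases pv_classify r with rfl|rfl|rfl|rfl|rfl|rfl|rfl|rfl|rfl|rfl|rfl|rfl|rfl|rfl|hr
       all_goals first
         | decide
         | rw [pv_unknownR_A _ r hr, pv_unknownR_B _ r hr])
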